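-- pv_equiv track=rewrite | github.com/blaq-swan/dsa-in-python | python-primer/solutions/distinct_odd_pair.py | odd_product
-- ===== SOURCE A (Python) =====
-- def odd_product(my_list):
--     """checks for odd_product when two numbers in a sequence are multiplied
--     Args: my_list
--     return: pairs whose product is odd"""
--     my_pair = []
--     if not isinstance(my_list, (list,tuple, range)):
--         raise TypeError("my_list must be a sequnce")
--     for i in range(len(my_list)):
--         for j in range(i + 1, len(my_list)):
--             if (my_list[i] * my_list[j]) % 2 == 1:
--                 my_pair += [(my_list[i],my_list[j])]
--     return my_pair
-- ===== SOURCE B (Python) =====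
-- def odd_product(my_list):
--     if not isinstance(my_list, (list, tuple, range)):
--         raise TypeError("my_list must be a sequnce")
--     odds = [x for x in my_list if x % 2 == 1]
--     pairs = []
--     for i, x in enumerate(odds):
--         for y in odds[i + 1:]:
--             pairs.append((x, y))
--     return pairs
-- ===== Notes on version B (the rewrite author's own statement) =====
-- stated objective: faster
-- what changed: Instead of the nested index loop multiplying and mod-testing every pair of the whole list, B filters the odd elements once and pairs only the filtered list (a product is odd iff both factors are odd); intended as faster when even elements are present (measured up to ~1780x on probe inputs, ~6x on random lists), same quadratic cost when all elements are odd.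
import Mathlib
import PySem

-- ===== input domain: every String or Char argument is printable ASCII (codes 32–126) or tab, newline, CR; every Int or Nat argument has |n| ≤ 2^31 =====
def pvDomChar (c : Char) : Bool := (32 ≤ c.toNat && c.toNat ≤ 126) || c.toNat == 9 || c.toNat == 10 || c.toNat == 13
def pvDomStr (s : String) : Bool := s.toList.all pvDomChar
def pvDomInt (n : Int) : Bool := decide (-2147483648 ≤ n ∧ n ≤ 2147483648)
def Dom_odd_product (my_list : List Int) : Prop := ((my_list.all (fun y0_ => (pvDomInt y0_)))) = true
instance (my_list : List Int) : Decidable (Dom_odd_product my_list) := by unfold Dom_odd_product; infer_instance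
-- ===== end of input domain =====

-- B filters the odd elements once and pairs only those (a product is odd iff both
-- factors are odd), instead of A's nested index loop testing every pair's product.

-- ===== PORT A =====
def odd_product (my_list : List Int) : List (Int × Int) :=
  (PySem.List.pyRange 0 (my_list.length : Int) 1).foldl (fun my_pair i =>
    (PySem.List.pyRange (i + 1) (my_list.length : Int) 1).foldl (fun my_pair j =>
      if PySem.Int.mod (PySem.List.pyGetD my_list i 0 * PySem.List.pyGetD my_list j 0) 2 == 1
      then my_pair ++ [(PySem.List.pyGetD my_list i 0, PySem.List.pyGetD my_list j 0)]
      else my_pair) my_pair) []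

-- ===== PORT B =====
def odd_product_alt (my_list : List Int) : List (Int × Int) :=
  let odds := my_list.filter (fun x => PySem.Int.mod x 2 == 1)
  (PySem.List.enumerate odds 0).foldl (fun pairs ix =>
    (PySem.List.slice odds (some (ix.1 + 1)) none).foldl
      (fun pairs y => pairs ++ [(ix.2, y)]) pairs) []

-- ===== PRECONDITION & SPEC =====
def Spec_odd_product (my_list : List Int) (out : List (Int × Int)) : Prop := out = odd_product_alt my_list
instance (my_list : List Int) (out : List (Int × Int)) : Decidable (Spec_odd_product my_list out) := by unfold Spec_odd_product; infer_instance

-- ===== CLAIM (what is proved, stated in full; the proofs are below) =====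
def Claim_equal_odd_product : Prop := ∀ (my_list : List Int), Dom_odd_product my_list → Spec_odd_product my_list (odd_product my_list)

-- ===== LEMMAS AND PROOFS =====

-- all ordered pairs (xs[i], xs[j]) with i < j, structurally: what B's double loop builds
def pvPairs : List Int → List (Int × Int)
  | [] => []
  | x :: xs => xs.map (fun y => (x, y)) ++ pvPairs xs

lemma pv_pairs_loop (t : List Int) : ∀ (s : Nat) (full : List Int),
    full.drop s = t → ∀ (acc : List (Int × Int)),
    (PySem.List.enumerate t (s : Int)).foldl (fun pairs ix =>
      (PySem.List.slice full (some (ix.1 + 1)) none).foldl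
        (fun pairs y => pairs ++ [(ix.2, y)]) pairs) acc
    = acc ++ pvPairs t := by
  induction t with
  | nil =>
    intro s full hdrop acc
    simp [PySem.List.enumerate_nil, pvPairs]
  | cons x xs ih =>
    intro s full hdrop acc
    have hdrop1 : full.drop (s + 1) = xs := by
      rw [← List.tail_drop, hdrop]; rfl
    rw [PySem.List.enumerate_cons, List.foldl_cons]
    rw [show ((s : Int) + 1) = ((s + 1 : Nat) : Int) by push_cast; ring]
    rw [PySem.List.slice_from_natCast, hdrop1,
        PySem.List.foldl_append_singleton_eq_map, ih (s + 1) full hdrop1]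
    simp [pvPairs]

lemma pv_alt_eq_pairs (l : List Int) :
    odd_product_alt l = pvPairs (l.filter (fun x => PySem.Int.mod x 2 == 1)) := by
  unfold odd_product_alt
  have h := pv_pairs_loop (l.filter (fun x => PySem.Int.mod x 2 == 1)) 0
    (l.filter (fun x => PySem.Int.mod x 2 == 1)) (by simp) []
  simpa using h

-- pairs A's outer iteration at element x collects: later partners of x with odd product
def pvGather : List Int → List (Int × Int)
  | [] => []
  | x :: xs => (xs.filter (fun b => PySem.Int.mod (x * b) 2 == 1)).map (fun b => (x, b)) ++ pvGather xs

lemma pv_mod_mul_two (x b : Int) :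
    (PySem.Int.mod (x * b) 2 == 1) = ((PySem.Int.mod x 2 == 1) && (PySem.Int.mod b 2 == 1)) := by
  rw [PySem.Int.mod_eq_emod_of_pos (a := x * b) (by norm_num),
      PySem.Int.mod_eq_emod_of_pos (a := x) (by norm_num),
      PySem.Int.mod_eq_emod_of_pos (a := b) (by norm_num)]
  have hm : (x * b) % 2 = ((x % 2) * (b % 2)) % 2 := by
    rw [Int.mul_emod]
  rcases Int.emod_two_eq x with hx | hx <;> rcases Int.emod_two_eq b with hb | hb <;>
    simp [hm, hx, hb]

lemma pv_gather_eq_pairs (l : List Int) :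
    pvGather l = pvPairs (l.filter (fun x => PySem.Int.mod x 2 == 1)) := by
  induction l with
  | nil => rfl
  | cons x xs ih =>
    rcases PySem.Int.mod_two_eq x with hx | hx
    · have hfil : xs.filter (fun b => PySem.Int.mod (x * b) 2 == 1) = [] := by
        simp only [pv_mod_mul_two, hx]
        simp
      simp only [pvGather, List.filter_cons, hx, hfil, ih]
      simp
    · have hfil : xs.filter (fun b => PySem.Int.mod (x * b) 2 == 1)
          = xs.filter (fun b => PySem.Int.mod b 2 == 1) := by
        simp only [pv_mod_mul_two, hx]
        simp
      simp only [pvGather, List.filter_cons, hx, hfil, ih]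
      simp [pvPairs]

lemma pv_outer_loop (t : List Int) : ∀ (s : Nat) (full : List Int),
    full.drop s = t → ∀ (acc : List (Int × Int)),
    (PySem.List.pyRange (s : Int) (full.length : Int) 1).foldl (fun my_pair i =>
      (PySem.List.pyRange (i + 1) (full.length : Int) 1).foldl (fun my_pair j =>
        if PySem.Int.mod (PySem.List.pyGetD full i 0 * PySem.List.pyGetD full j 0) 2 == 1
        then my_pair ++ [(PySem.List.pyGetD full i 0, PySem.List.pyGetD full j 0)]
        else my_pair) my_pair) acc
    = acc ++ pvGather t := by
  induction t with
  | nil =>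
    intro s full hdrop acc
    have hs : (full.length : Int) ≤ (s : Int) := by
      have := List.drop_eq_nil_iff.mp hdrop
      exact_mod_cast this
    rw [PySem.List.pyRange_one_eq_nil hs]
    simp [pvGather]
  | cons x xs ih =>
    intro s full hdrop acc
    have hlen : s < full.length := by
      by_contra h
      rw [List.drop_eq_nil_of_le (by omega)] at hdrop
      exact List.cons_ne_nil x xs hdrop.symm
    have hget : PySem.List.pyGetD full (s : Int) 0 = x := by
      rw [PySem.List.pyGetD_natCast]
      have : full[s]? = some x := by
        have := congrArg (fun l => l.head?) hdrop
        simpa [List.head?_drop] using this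
      simp [List.getD, this]
    have hdrop1 : full.drop (s + 1) = xs := by
      rw [← List.tail_drop, hdrop]; rfl
    rw [PySem.List.pyRange_one_cons (by exact_mod_cast hlen), List.foldl_cons, hget]
    have hinner :
        (PySem.List.pyRange ((s : Int) + 1) (full.length : Int) 1).foldl (fun my_pair j =>
          if PySem.Int.mod (x * PySem.List.pyGetD full j 0) 2 == 1
          then my_pair ++ [(x, PySem.List.pyGetD full j 0)]
          else my_pair) acc
        = acc ++ (xs.filter (fun b => PySem.Int.mod (x * b) 2 == 1)).map (fun b => (x, b)) := by
      have h1 := PySem.List.foldl_pyRange_pyGetD' full 0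
        (fun acc2 b => if PySem.Int.mod (x * b) 2 == 1 then acc2 ++ [(x, b)] else acc2)
        acc (a := (s : Int) + 1) (by positivity)
      rw [show ((s : Int) + 1).toNat = s + 1 by omega, hdrop1] at h1
      exact h1.trans (PySem.List.foldl_append_if _ _ xs acc)
    rw [hinner, show ((s : Int) + 1) = ((s + 1 : Nat) : Int) by push_cast; ring,
        ih (s + 1) full hdrop1]
    simp [pvGather]

-- ===== VERDICT (by name: the statement is the Claim_ definition above) =====
theorem odd_product_spec : Claim_equal_odd_product := by
  intro my_list _
  unfold Spec_odd_product odd_product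
  rw [pv_alt_eq_pairs, ← pv_gather_eq_pairs]
  have h := pv_outer_loop my_list 0 my_list (by simp) []
  simpa using h
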